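-- pv_equiv track=rewrite | github.com/pyscf/pyscf | pyscf/symm/basis.py | so3_irrep_symb2id
-- ===== SOURCE A (Python) =====
-- _SO3_SYMB2ID = {
--     's+0' :     0,
--     'p-1':    106,
--     'p+0':    105,
--     'p+1':    107,
--     'd-2':    211,
--     'd-1':    203,
--     'd+0':    200,
--     'd+1':    202,
--     'd+2':    210,
--     'f-3':    316,
--     'f-2':    314,
--     'f-1':    306,
--     'f+0':    305,
--     'f+1':    307,
--     'f+2':    315,
--     'f+3':    317,
--     'g-4':    421,
--     'g-3':    413,
--     'g-2':    411,
--     'g-1':    403,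
--     'g+0':    400,
--     'g+1':    402,
--     'g+2':    410,
--     'g+3':    412,
--     'g+4':    420,
--     'h-5':    526,
--     'h-4':    524,
--     'h-3':    516,
--     'h-2':    514,
--     'h-1':    506,
--     'h+0':    505,
--     'h+1':    507,
--     'h+2':    515,
--     'h+3':    517,
--     'h+4':    525,
--     'h+5':    527,
--     'i-6':    631,
--     'i-5':    623,
--     'i-4':    621,
--     'i-3':    613,
--     'i-2':    611,
--     'i-1':    603,
--     'i+0':    600,
--     'i+1':    602,
--     'i+2':    610,
--     'i+3':    612,
--     'i+4':    620,
--     'i+5':    622,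
--     'i+6':    630,
-- }
--
-- _ANGULAR = 'spdfghiklmnortu'
--
-- def so3_irrep_symb2id(symb):
--     symb = symb.lower()
--     if symb in _SO3_SYMB2ID:
--         return _SO3_SYMB2ID[symb]
--     else:
--         s = ''.join([i for i in symb if i.isalpha()])
--         n = int(''.join([i for i in symb if not i.isalpha()]))
--         e2 = abs(n) // 2
--         l = _ANGULAR.index(s)
--         if abs(n) > l:
--             raise KeyError(symb)
--         gu = 'u' if l % 2 else 'g'
--         xy = 'y' if n < 0 else 'x'
--         parity = '_odd' if n % 2 else '_even'
--         return l * 100 + e2 * 10 + DOOH_IRREP_ID_TABLE[parity + gu + xy]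
--
-- DOOH_IRREP_ID_TABLE = {
--     'A1g' : 0,
--     'A2g' : 1,
--     'A1u' : 5,
--     'A2u' : 4,
--     'E1gx': 2,
--     'E1gy': 3,
--     'E1ux': 7,
--     'E1uy': 6,
--     '_evengx': 0,
--     '_evengy': 1,
--     '_evenux': 5,
--     '_evenuy': 4,
--     '_oddgx': 2,
--     '_oddgy': 3,
--     '_oddux': 7,
--     '_odduy': 6,
-- }
-- ===== SOURCE B (Python) =====
-- _ANGULAR = 'spdfghiklmnortu'
--
-- def so3_irrep_symb2id(symb):
--     symb = symb.lower()
--     s = ''.join(c for c in symb if c.isalpha())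
--     n = int(''.join(c for c in symb if not c.isalpha()))
--     l = _ANGULAR.index(s)
--     if abs(n) > l:
--         raise KeyError(symb)
--     u = l % 2
--     return l * 100 + (abs(n) // 2) * 10 + 4 * u + 2 * (abs(n) % 2) + ((1 if n < 0 else 0) ^ u)
-- ===== Notes on version B (the rewrite author's own statement) =====
-- stated objective: simpler
-- what changed: B removes the 49-entry _SO3_SYMB2ID cache and the DOOH_IRREP_ID_TABLE dict entirely: it always parses the symbol and computes the trailing irrep id arithmetically as 4*(l%2) + 2*(|n|%2) + ((n<0) XOR l%2) instead of building a key string and looking it up.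
import Mathlib
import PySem

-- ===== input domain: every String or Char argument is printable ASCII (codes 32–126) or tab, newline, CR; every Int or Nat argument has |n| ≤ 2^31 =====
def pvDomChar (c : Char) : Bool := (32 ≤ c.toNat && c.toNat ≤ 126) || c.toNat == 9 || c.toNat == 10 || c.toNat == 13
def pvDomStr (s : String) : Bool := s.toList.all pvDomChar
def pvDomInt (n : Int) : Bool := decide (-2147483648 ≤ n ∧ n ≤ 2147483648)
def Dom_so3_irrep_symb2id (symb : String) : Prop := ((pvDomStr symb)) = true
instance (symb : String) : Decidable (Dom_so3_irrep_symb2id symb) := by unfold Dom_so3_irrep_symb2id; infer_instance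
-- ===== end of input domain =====

-- B drops the 49-entry symbol cache and the DOOH id table: it always parses the symbol and
-- computes the trailing irrep id arithmetically (objective: simpler).

-- ===== PORT A =====
-- strings are represented as List Char throughout (PySem.Chars is the List Char side of PySem.Str)
def pvAngular : List Char := "spdfghiklmnortu".toList

def pvSO3Table : PySem.Dict (List Char) Int := PySem.Dict.mk [
  (['s', '+', '0'], 0),
  (['p', '-', '1'], 106),
  (['p', '+', '0'], 105),
  (['p', '+', '1'], 107),
  (['d', '-', '2'], 211),
  (['d', '-', '1'], 203),
  (['d', '+', '0'], 200),
  (['d', '+', '1'], 202),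
  (['d', '+', '2'], 210),
  (['f', '-', '3'], 316),
  (['f', '-', '2'], 314),
  (['f', '-', '1'], 306),
  (['f', '+', '0'], 305),
  (['f', '+', '1'], 307),
  (['f', '+', '2'], 315),
  (['f', '+', '3'], 317),
  (['g', '-', '4'], 421),
  (['g', '-', '3'], 413),
  (['g', '-', '2'], 411),
  (['g', '-', '1'], 403),
  (['g', '+', '0'], 400),
  (['g', '+', '1'], 402),
  (['g', '+', '2'], 410),
  (['g', '+', '3'], 412),
  (['g', '+', '4'], 420),
  (['h', '-', '5'], 526),
  (['h', '-', '4'], 524),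
  (['h', '-', '3'], 516),
  (['h', '-', '2'], 514),
  (['h', '-', '1'], 506),
  (['h', '+', '0'], 505),
  (['h', '+', '1'], 507),
  (['h', '+', '2'], 515),
  (['h', '+', '3'], 517),
  (['h', '+', '4'], 525),
  (['h', '+', '5'], 527),
  (['i', '-', '6'], 631),
  (['i', '-', '5'], 623),
  (['i', '-', '4'], 621),
  (['i', '-', '3'], 613),
  (['i', '-', '2'], 611),
  (['i', '-', '1'], 603),
  (['i', '+', '0'], 600),
  (['i', '+', '1'], 602),
  (['i', '+', '2'], 610),
  (['i', '+', '3'], 612),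
  (['i', '+', '4'], 620),
  (['i', '+', '5'], 622),
  (['i', '+', '6'], 630)]

def pvDoohTable : PySem.Dict (List Char) Int := PySem.Dict.mk [
  (['A', '1', 'g'], 0),
  (['A', '2', 'g'], 1),
  (['A', '1', 'u'], 5),
  (['A', '2', 'u'], 4),
  (['E', '1', 'g', 'x'], 2),
  (['E', '1', 'g', 'y'], 3),
  (['E', '1', 'u', 'x'], 7),
  (['E', '1', 'u', 'y'], 6),
  (['_', 'e', 'v', 'e', 'n', 'g', 'x'], 0),
  (['_', 'e', 'v', 'e', 'n', 'g', 'y'], 1),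
  (['_', 'e', 'v', 'e', 'n', 'u', 'x'], 5),
  (['_', 'e', 'v', 'e', 'n', 'u', 'y'], 4),
  (['_', 'o', 'd', 'd', 'g', 'x'], 2),
  (['_', 'o', 'd', 'd', 'g', 'y'], 3),
  (['_', 'o', 'd', 'd', 'u', 'x'], 7),
  (['_', 'o', 'd', 'd', 'u', 'y'], 6)]

-- the else-branch of A: parse the (already lowered) symbol and look the tail id up in the DOOH table
def so3A_fallback (t : List Char) : Int :=
  let s := t.filter (fun c => PySem.Chars.isalpha c)
  let d := t.filter (fun c => !PySem.Chars.isalpha c)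
  let n : Int := (PySem.Int.ofChars? d).getD 0      -- none = int() ValueError, excluded by Pre_
  let e2 := PySem.Int.floordiv |n| 2
  let l : Int := PySem.Chars.find pvAngular s       -- -1 = .index ValueError, excluded by Pre_
  if l < |n| then 0                                  -- raise KeyError, excluded by Pre_
  else
    let gu : List Char := if PySem.Int.mod l 2 ≠ 0 then ['u'] else ['g']
    let xy : List Char := if n < 0 then ['y'] else ['x']
    let parity : List Char := if PySem.Int.mod n 2 ≠ 0 then ['_','o','d','d'] else ['_','e','v','e','n']
    l * 100 + e2 * 10 + pvDoohTable.getD (parity ++ gu ++ xy) 0  -- key provably always present, so getD is exact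

def so3_irrep_symb2id (symb : String) : Int :=
  let t := PySem.Chars.lower symb.toList
  match pvSO3Table.get? t with
  | some v => v
  | none => so3A_fallback t

-- ===== PORT B =====
def so3B_core (t : List Char) : Int :=
  let s := t.filter (fun c => PySem.Chars.isalpha c)
  let n : Int := (PySem.Int.ofChars? (t.filter (fun c => !PySem.Chars.isalpha c))).getD 0  -- none = ValueError, excluded by Pre_
  let l : Int := PySem.Chars.find pvAngular s       -- -1 = ValueError, excluded by Pre_
  if l < |n| then 0                                  -- raise KeyError, excluded by Pre_
  else
    let u := PySem.Int.mod l 2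
    l * 100 + PySem.Int.floordiv |n| 2 * 10 + 4 * u + 2 * PySem.Int.mod |n| 2
      + PySem.Int.bxor (if n < 0 then (1 : Int) else 0) u

def so3_irrep_symb2id_alt (symb : String) : Int :=
  so3B_core (PySem.Chars.lower symb.toList)

-- ===== PRECONDITION & SPEC =====
-- Pre_ excludes exactly the inputs where A raises: the non-alpha part of the lowered symbol
-- is not a valid int literal (ValueError), the alpha part does not occur in _ANGULAR
-- (ValueError), or abs(n) exceeds the found index (the explicit KeyError).
def Pre_so3_irrep_symb2id (symb : String) : Prop :=
  let t := PySem.Chars.lower symb.toList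
  let l := PySem.Chars.find pvAngular (t.filter (fun c => PySem.Chars.isalpha c))
  let n? := PySem.Int.ofChars? (t.filter (fun c => !PySem.Chars.isalpha c))
  n?.isSome = true ∧ 0 ≤ l ∧ |n?.getD 0| ≤ l
instance (symb : String) : Decidable (Pre_so3_irrep_symb2id symb) := by unfold Pre_so3_irrep_symb2id; infer_instance

def pvWitness_so3_irrep_symb2id : String := "d-2"

def Spec_so3_irrep_symb2id (symb : String) (out : Int) : Prop := out = so3_irrep_symb2id_alt symb
instance (symb : String) (out : Int) : Decidable (Spec_so3_irrep_symb2id symb out) := by unfold Spec_so3_irrep_symb2id; infer_instance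

-- ===== CLAIM (what is proved, stated in full; the proofs are below) =====
def Claim_equal_so3_irrep_symb2id : Prop := ∀ (symb : String), Dom_so3_irrep_symb2id symb → Pre_so3_irrep_symb2id symb → Spec_so3_irrep_symb2id symb (so3_irrep_symb2id symb)

-- ===== LEMMAS AND PROOFS =====

-- every cached entry of the symbol table is exactly what B computes on its key
theorem so3B_matches_table : ∀ p ∈ pvSO3Table.items, so3B_core p.1 = p.2 := by decide

-- the DOOH table value equals B's arithmetic tail
theorem dooh_arith (n l : Int) :
    pvDoohTable.getD ((if PySem.Int.mod n 2 ≠ 0 then ['_','o','d','d'] else ['_','e','v','e','n']) ++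
        (if PySem.Int.mod l 2 ≠ 0 then ['u'] else ['g']) ++ (if n < 0 then ['y'] else ['x'])) 0
      = 4 * PySem.Int.mod l 2 + 2 * PySem.Int.mod |n| 2
        + PySem.Int.bxor (if n < 0 then (1 : Int) else 0) (PySem.Int.mod l 2) := by
  have en : PySem.Int.mod n 2 = n % 2 := PySem.Int.mod_eq_emod_of_pos (by norm_num)
  have el : PySem.Int.mod l 2 = l % 2 := PySem.Int.mod_eq_emod_of_pos (by norm_num)
  have ea : PySem.Int.mod |n| 2 = |n| % 2 := PySem.Int.mod_eq_emod_of_pos (by norm_num)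
  have ha : |n| % 2 = n % 2 := by
    by_cases h : 0 ≤ n
    · rw [abs_of_nonneg h]
    · rw [abs_of_neg (by omega : n < 0)]; omega
  rcases Int.emod_two_eq n with hn | hn <;> rcases Int.emod_two_eq l with hl2 | hl2 <;>
    by_cases hneg : n < 0 <;>
      simp only [en, el, ea, ha, hn, hl2, hneg] <;> decide

theorem core_eq (t : List Char)
    (h1 : (PySem.Int.ofChars? (t.filter (fun c => !PySem.Chars.isalpha c))).isSome = true)
    (h3 : |(PySem.Int.ofChars? (t.filter (fun c => !PySem.Chars.isalpha c))).getD 0| ≤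
          PySem.Chars.find pvAngular (t.filter (fun c => PySem.Chars.isalpha c))) :
    (match pvSO3Table.get? t with
     | some v => v
     | none => so3A_fallback t) = so3B_core t := by
  cases hget : pvSO3Table.get? t with
  | some v =>
      have hm := PySem.Dict.mem_items_of_get?_eq_some pvSO3Table hget
      exact (so3B_matches_table (t, v) hm).symm
  | none =>
      obtain ⟨n, hn⟩ := Option.isSome_iff_exists.mp h1
      rw [hn] at h3
      simp only [Option.getD_some] at h3
      unfold so3A_fallback so3B_core
      simp only [hn, Option.getD_some]
      have h3' := not_lt.mpr h3
      rw [if_neg h3', if_neg h3', dooh_arith n _]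
      ring

-- ===== VERDICT (by name: the statement is the Claim_ definition above) =====
theorem so3_irrep_symb2id_spec : Claim_equal_so3_irrep_symb2id := by
  intro symb _ hpre
  obtain ⟨h1, h2, h3⟩ := hpre
  exact core_eq (PySem.Chars.lower symb.toList) h1 h3
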